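-- pv_equiv track=rewrite | github.com/UDC-GAC/BDWatchdog | ReportGenerator/src/reporting/utils.py | split_tests_by_test_type
-- ===== SOURCE A (Python) =====
-- def split_tests_by_test_type(tests):
--     benchmarks = dict()
--     for test in tests:
--         test_benchmark = test["test_name"].split("_")[0]
--         if test_benchmark not in benchmarks:
--             benchmarks[test_benchmark] = list()
--         benchmarks[test_benchmark].append(test)
--     return benchmarks
-- ===== SOURCE B (Python) =====
-- def split_tests_by_test_type(tests):
--     key = lambda test: test["test_name"].split("_")[0]
--     # collect prefixes in first-occurrence order, then build each group by filtering
--     prefixes = list(dict.fromkeys(key(test) for test in tests))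
--     return {p: [test for test in tests if key(test) == p] for p in prefixes}
-- ===== Notes on version B (the rewrite author's own statement) =====
-- stated objective: alternative
-- what changed: Replaces the single-pass dict accumulation (conditional insert + append per element) with a two-phase scheme: dedup the name prefixes in first-occurrence order, then build each group by filtering the list per prefix.
import Mathlib
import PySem

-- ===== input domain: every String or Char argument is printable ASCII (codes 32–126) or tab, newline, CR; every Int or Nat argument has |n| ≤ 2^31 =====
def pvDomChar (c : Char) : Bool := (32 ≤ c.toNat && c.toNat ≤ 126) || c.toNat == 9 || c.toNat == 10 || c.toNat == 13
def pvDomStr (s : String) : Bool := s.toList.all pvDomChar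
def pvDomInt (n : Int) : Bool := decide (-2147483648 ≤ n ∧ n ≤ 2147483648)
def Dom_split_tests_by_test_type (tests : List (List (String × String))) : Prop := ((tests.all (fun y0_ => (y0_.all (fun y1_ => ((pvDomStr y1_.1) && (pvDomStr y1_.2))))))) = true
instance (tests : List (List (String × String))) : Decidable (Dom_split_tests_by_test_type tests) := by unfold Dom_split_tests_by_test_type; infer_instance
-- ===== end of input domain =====

-- B groups by building the first-occurrence-ordered list of prefixes and filtering per prefix,
-- instead of A's single-pass dict accumulation; equal return value, no speed claim.

-- ===== PORT A =====
-- shared key expression: test["test_name"].split("_")[0]  (split never returns an empty list,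
-- and "_" is a nonempty separator, so the defaults are never used under Pre_)
def pvKey (test : List (String × String)) : String :=
  (((PySem.Str.split? ((PySem.Dict.ofList test).getD "test_name" "") "_").getD []).headD "")

def split_tests_by_test_type (tests : List (List (String × String))) : List (String × List (List (String × String))) :=
  (tests.foldl (fun benchmarks test =>
      let test_benchmark := pvKey test
      let benchmarks :=
        if benchmarks.contains test_benchmark then benchmarks
        else benchmarks.insert test_benchmark ([] : List (List (String × String)))
      benchmarks.modify test_benchmark [] (fun l => l ++ [test]))
    PySem.Dict.empty).items

-- ===== PORT B =====
def split_tests_by_test_type_alt (tests : List (List (String × String))) : List (String × List (List (String × String))) :=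
  (PySem.List.dedup (tests.map pvKey)).map
    (fun p => (p, tests.filter (fun test => pvKey test == p)))

-- ===== PRECONDITION & SPEC =====
-- Pre_ excludes tests lacking a "test_name" key, on which Python A (and B) raise KeyError.
def Pre_split_tests_by_test_type (tests : List (List (String × String))) : Prop :=
  (tests.all (fun test => test.any (fun p => p.1 == "test_name"))) = true
instance (tests : List (List (String × String))) : Decidable (Pre_split_tests_by_test_type tests) := by
  unfold Pre_split_tests_by_test_type; infer_instance
def pvWitness_split_tests_by_test_type : (List (List (String × String))) :=
  [[("test_name", "cpu_a")], [("test_name", "cpu_b"), ("k", "v")], [("test_name", "mem_1")]]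

def Spec_split_tests_by_test_type (tests : List (List (String × String))) (out : List (String × List (List (String × String)))) : Prop := out = split_tests_by_test_type_alt tests
instance (tests : List (List (String × String))) (out : List (String × List (List (String × String)))) : Decidable (Spec_split_tests_by_test_type tests out) := by unfold Spec_split_tests_by_test_type; infer_instance

-- ===== CLAIM (what is proved, stated in full; the proofs are below) =====
def Claim_equal_split_tests_by_test_type : Prop := ∀ (tests : List (List (String × String))), Dom_split_tests_by_test_type tests → Pre_split_tests_by_test_type tests → Spec_split_tests_by_test_type tests (split_tests_by_test_type tests)

-- ===== LEMMAS AND PROOFS =====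

-- the conditional "if absent, insert []" before the append is absorbed by modify
theorem pv_step_eq (d : PySem.Dict String (List (List (String × String)))) (t : List (String × String)) :
    ((if d.contains (pvKey t) then d else d.insert (pvKey t) ([] : List (List (String × String)))).modify
        (pvKey t) [] (fun l => l ++ [t]))
      = d.modify (pvKey t) [] (fun l => l ++ [t]) := by
  by_cases h : d.contains (pvKey t)
  · simp [h]
  · have h' : d.contains (pvKey t) = false := by simpa using h
    have hall : ∀ p ∈ d.items, (p.1 == pvKey t) = false := by
      intro p hp
      by_contra hc
      have : d.contains (pvKey t) = true := by
        unfold PySem.Dict.contains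
        rw [List.any_eq_true]
        exact ⟨p, hp, by simpa using hc⟩
      rw [this] at h'; exact absurd h' (by simp)
    have hgetD : d.getD (pvKey t) [] = [] := PySem.Dict.getD_of_not_contains d _ h'
    apply PySem.Dict.ext
    unfold PySem.Dict.modify
    rw [h', if_neg (by simp)]
    have hc2 : (d.insert (pvKey t) ([] : List (List (String × String)))).contains (pvKey t) = true :=
      PySem.Dict.contains_insert_self d _ _
    rw [PySem.Dict.items_insert_of_contains _ _ hc2,
        PySem.Dict.items_insert_of_not_contains _ _ h',
        PySem.Dict.items_insert_of_not_contains _ _ h']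
    rw [PySem.Dict.getD_insert_self, hgetD]
    rw [List.map_append]
    congr 1
    · calc List.map (fun p => if (p.1 == pvKey t) = true then (pvKey t, (fun l => l ++ [t]) []) else p) d.items
          = List.map id d.items := List.map_congr_left (fun p hp => by rw [hall p hp]; simp)
        _ = d.items := List.map_id d.items
    · simp

theorem split_tests_by_test_type_agree (tests : List (List (String × String))) :
    split_tests_by_test_type tests = split_tests_by_test_type_alt tests := by
  unfold split_tests_by_test_type split_tests_by_test_type_alt
  have hstep : (tests.foldl (fun benchmarks test =>
        let test_benchmark := pvKey test
        let benchmarks :=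
          if benchmarks.contains test_benchmark then benchmarks
          else benchmarks.insert test_benchmark ([] : List (List (String × String)))
        benchmarks.modify test_benchmark [] (fun l => l ++ [test]))
      PySem.Dict.empty)
      = (tests.map (fun t => (pvKey t, t))).foldl
          (fun d p => d.modify p.1 [] (fun l => l ++ [p.2])) PySem.Dict.empty := by
    rw [List.foldl_map]
    congr 1
    funext d t
    exact pv_step_eq d t
  rw [hstep]
  have hfold : (tests.map (fun t => (pvKey t, t))).foldl
      (fun d p => d.modify p.1 [] (fun l => l ++ [p.2])) PySem.Dict.empty
      = tests.foldl (fun d t => d.modify (pvKey t) [] (fun l => l ++ [t])) PySem.Dict.empty := by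
    rw [List.foldl_map]
  have hkeys : ((tests.map (fun t => (pvKey t, t))).foldl
      (fun d p => d.modify p.1 [] (fun l => l ++ [p.2])) PySem.Dict.empty).keys
      = PySem.Set.ofList (tests.map pvKey) := by
    rw [hfold,
      PySem.Dict.keys_foldl_modify_key tests pvKey [] (fun _ x => fun l => l ++ [x]) PySem.Dict.empty]
    rw [PySem.Dict.keys_empty, PySem.Set.update_nil_left]
  have hnd : ((tests.map (fun t => (pvKey t, t))).foldl
      (fun d p => d.modify p.1 [] (fun l => l ++ [p.2])) PySem.Dict.empty).keys.Nodup := by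
    rw [hkeys]; exact PySem.Set.nodup_ofList _
  rw [PySem.Dict.items_eq_map_keys _ hnd [], hkeys]
  simp only [PySem.List.dedup_eq_ofList]
  apply List.map_congr_left
  intro c _
  have hgetD := PySem.Dict.getD_foldl_modify_append (tests.map (fun t => (pvKey t, t)))
      PySem.Dict.empty c
  rw [hgetD, PySem.Dict.getD_empty]
  simp [List.filter_map, Function.comp_def]

-- ===== VERDICT (by name: the statement is the Claim_ definition above) =====
theorem split_tests_by_test_type_spec : Claim_equal_split_tests_by_test_type := by
  intro tests _ _
  unfold Spec_split_tests_by_test_type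
  exact split_tests_by_test_type_agree tests
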